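-- pv_equiv track=rewrite | github.com/jcolinpatrick/kryptos | scripts/blitz_strip_keyfind.py | is_consistent_key
-- ===== SOURCE A (Python) =====
-- def is_consistent_key(key_vals: dict, klen: int) -> tuple:
--     """
--     Check if key values are consistent for period klen.
--     key_vals: dict {crib_pos: implied_key_val}
--     Returns (True, partial_key_dict) if consistent, else (False, None).
--     partial_key_dict: {key_position: value} for covered positions
--     """
--     partial = {}
--     for p, kv in key_vals.items():
--         kp = p % klen
--         if kp in partial:
--             if partial[kp] != kv:
--                 return False, None
--         else:
--             partial[kp] = kv
--     return True, partial
-- ===== SOURCE B (Python) =====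
-- def is_consistent_key(key_vals: dict, klen: int) -> tuple:
--     """
--     Two-phase version: first group all implied key values by key position
--     (p % klen), then check each group holds a single distinct value.
--     """
--     # Pass 1: build an index of all implied values per key position.
--     groups = {}
--     for p, kv in key_vals.items():
--         kp = p % klen
--         if kp in groups:
--             groups[kp].append(kv)
--         else:
--             groups[kp] = [kv]
--     # Pass 2: each key position must hold one distinct value.
--     partial = {}
--     for kp, vals in groups.items():
--         first = vals[0]
--         if any(v != first for v in vals):
--             return False, None
--         partial[kp] = first
--     return True, partial
-- ===== Notes on version B (the rewrite author's own statement) =====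
-- stated objective: alternative
-- what changed: Replaces the fused early-exit scan (one loop that simultaneously builds the partial key and bails on the first mismatch) with two separate passes: pass 1 groups every implied key value by its residue p % klen into an index, pass 2 checks each group for a single distinct value and builds the partial key from group heads.
import Mathlib
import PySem

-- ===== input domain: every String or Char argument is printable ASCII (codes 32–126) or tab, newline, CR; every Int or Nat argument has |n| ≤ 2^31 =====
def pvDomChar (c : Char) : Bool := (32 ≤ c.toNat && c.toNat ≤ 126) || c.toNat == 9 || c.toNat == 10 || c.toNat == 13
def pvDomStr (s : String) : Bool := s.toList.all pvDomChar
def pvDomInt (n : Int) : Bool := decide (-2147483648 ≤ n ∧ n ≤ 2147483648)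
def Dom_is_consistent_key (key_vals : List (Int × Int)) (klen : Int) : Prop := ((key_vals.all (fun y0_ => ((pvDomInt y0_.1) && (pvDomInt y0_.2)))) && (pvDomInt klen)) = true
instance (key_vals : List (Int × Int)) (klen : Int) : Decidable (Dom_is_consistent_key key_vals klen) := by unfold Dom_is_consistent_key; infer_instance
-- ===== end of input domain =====

-- B replaces A's fused early-exit scan by two passes (group by residue, then check each
-- group); objective: alternative decomposition, same cost. Return-value equivalence only.

-- ===== PORT A =====
-- A's loop: build `partial`, early-exit on the first mismatch.
def isckAGo (klen : Int) (part : PySem.Dict Int Int) :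
    List (Int × Int) → Bool × Option (List (Int × Int))
  | [] => (true, some part.items)
  | (p, kv) :: rest =>
    let kp := PySem.Int.mod p klen
    match part.get? kp with          -- `if kp in partial` / `partial[kp]`
    | some v => if v ≠ kv then (false, none) else isckAGo klen part rest
    | none => isckAGo klen (part.insert kp kv) rest

def is_consistent_key (key_vals : List (Int × Int)) (klen : Int) :
    Bool × (Option (List (Int × Int))) :=
  isckAGo klen PySem.Dict.empty key_vals

-- ===== PORT B =====
-- B pass 1: group all implied key values by residue p % klen.
def isckBuild (klen : Int) (groups : PySem.Dict Int (List Int)) :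
    List (Int × Int) → PySem.Dict Int (List Int)
  | [] => groups
  | (p, kv) :: rest =>
    let kp := PySem.Int.mod p klen
    match groups.get? kp with
    | some vs => isckBuild klen (groups.insert kp (vs ++ [kv])) rest
    | none => isckBuild klen (groups.insert kp [kv]) rest

-- B pass 2: each group must hold one distinct value; collect the heads.
def isckCheck (part : PySem.Dict Int Int) :
    List (Int × List Int) → Bool × Option (List (Int × Int))
  | [] => (true, some part.items)
  | (kp, vals) :: rest =>
    let first := vals.headD 0        -- vals[0]: every group list is nonempty, default unused
    if vals.any (fun v => v ≠ first) then (false, none)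
    else isckCheck (part.insert kp first) rest

def is_consistent_key_alt (key_vals : List (Int × Int)) (klen : Int) :
    Bool × (Option (List (Int × Int))) :=
  isckCheck PySem.Dict.empty (isckBuild klen PySem.Dict.empty key_vals).items

-- ===== PRECONDITION & SPEC =====
-- Pre_ excludes only klen = 0 with a nonempty dict, where Python's `p % klen` raises
-- ZeroDivisionError (in A and in B alike).
def Pre_is_consistent_key (key_vals : List (Int × Int)) (klen : Int) : Prop :=
  key_vals = [] ∨ klen ≠ 0
instance (key_vals : List (Int × Int)) (klen : Int) : Decidable (Pre_is_consistent_key key_vals klen) := by unfold Pre_is_consistent_key; infer_instance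

def pvWitness_is_consistent_key : (List (Int × Int)) × Int := ([(0, 1), (5, 1), (3, 2)], 5)

def Spec_is_consistent_key (key_vals : List (Int × Int)) (klen : Int) (out : Bool × (Option (List (Int × Int)))) : Prop := out = is_consistent_key_alt key_vals klen
instance (key_vals : List (Int × Int)) (klen : Int) (out : Bool × (Option (List (Int × Int)))) : Decidable (Spec_is_consistent_key key_vals klen out) := by unfold Spec_is_consistent_key; infer_instance

-- ===== CLAIM (what is proved, stated in full; the proofs are below) =====
def Claim_equal_is_consistent_key : Prop := ∀ (key_vals : List (Int × Int)) (klen : Int), Dom_is_consistent_key key_vals klen → Pre_is_consistent_key key_vals klen → Spec_is_consistent_key key_vals klen (is_consistent_key key_vals klen)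

-- ===== LEMMAS AND PROOFS =====

-- relation between an entry of A's `partial` and the corresponding group of B
def isckRel (a : Int × Int) (b : Int × List Int) : Prop :=
  b.1 = a.1 ∧ b.2 ≠ [] ∧ ∀ x ∈ b.2, x = a.2

-- some group contains a value different from its first element
def isckBad (g : PySem.Dict Int (List Int)) : Prop :=
  ∃ pr ∈ g.items, ∃ x ∈ pr.2, x ≠ pr.2.headD 0

theorem isck_headD_append (vs l : List Int) (h : vs ≠ []) :
    (vs ++ l).headD 0 = vs.headD 0 := by cases vs with
  | nil => exact absurd rfl h
  | cons w t => rfl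

-- lookups agree through the relation
theorem isck_get_rel (dit : List (Int × Int)) (git : List (Int × List Int))
    (h : List.Forall₂ isckRel dit git) (kp : Int) :
    ((PySem.Dict.mk dit).get? kp = none ∧ (PySem.Dict.mk git).get? kp = none) ∨
    ∃ v vs, (PySem.Dict.mk dit).get? kp = some v ∧ (PySem.Dict.mk git).get? kp = some vs ∧
      vs ≠ [] ∧ ∀ x ∈ vs, x = v := by
  induction h with
  | nil => left; constructor <;> rfl
  | @cons a b dit' git' hab _ ih =>
    obtain ⟨a1, a2⟩ := a
    obtain ⟨b1, bs⟩ := b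
    obtain ⟨hk, hne, hall⟩ := hab
    simp only at hk hne hall
    rw [PySem.Dict.get?_mk_cons, PySem.Dict.get?_mk_cons, hk]
    by_cases hkp : (a1 == kp) = true
    · right
      exact ⟨a2, bs, by simp [hkp], by simp [hkp], hne, hall⟩
    · simp only [hkp, Bool.false_eq_true, if_false]
      simpa using ih

-- pass 2 on an all-consistent group list related to `dit`
theorem isck_check_ok (dit : List (Int × Int)) (git : List (Int × List Int))
    (h : List.Forall₂ isckRel dit git) :
    ∀ acc : PySem.Dict Int Int, (git.map Prod.fst).Nodup →
    (∀ k ∈ git.map Prod.fst, acc.contains k = false) →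
    isckCheck acc git = (true, some (acc.items ++ dit)) := by
  induction h with
  | nil => intro acc _ _; simp [isckCheck]
  | @cons a b dit' git' hab _ ih =>
    intro acc hnd hfresh
    obtain ⟨a1, a2⟩ := a
    obtain ⟨b1, bs⟩ := b
    obtain ⟨hk, hne, hall⟩ := hab
    simp only at hk hne hall
    have hhead : bs.headD 0 = a2 := by
      cases bs with
      | nil => exact absurd rfl hne
      | cons w t => simpa using hall w (by simp)
    have hany : bs.any (fun v => v ≠ bs.headD 0) = false := by
      simp only [List.any_eq_false, decide_eq_true_eq, ne_eq, not_not]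
      intro v hv; rw [hhead]; exact hall v hv
    have hnd2 : (b1 :: git'.map Prod.fst).Nodup := by simpa using hnd
    have hcont : acc.contains a1 = false := hk ▸ hfresh b1 (by simp)
    have hins : (acc.insert b1 (bs.headD 0)).items = acc.items ++ [(a1, a2)] := by
      rw [hhead, hk]; exact PySem.Dict.items_insert_of_not_contains acc a2 hcont
    simp only [isckCheck, hany, if_false, Bool.false_eq_true]
    rw [ih (acc.insert b1 (bs.headD 0)) hnd2.of_cons]
    · rw [hins]; simp
    · intro k hkmem
      rw [PySem.Dict.contains_insert]
      have hk1 : ¬ k = b1 := by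
        intro hEq; subst hEq
        exact (List.nodup_cons.mp hnd2).1 hkmem
      simp [hk1, hfresh k (by simp [hkmem])]

-- pass 2 returns (false, none) whenever some group is inconsistent
theorem isck_check_bad (git : List (Int × List Int)) :
    ∀ acc : PySem.Dict Int Int,
    (∃ pr ∈ git, ∃ x ∈ pr.2, x ≠ pr.2.headD 0) →
    isckCheck acc git = (false, none) := by
  induction git with
  | nil => intro acc h; obtain ⟨pr, hpr, _⟩ := h; simp at hpr
  | cons hd tl ih =>
    intro acc h
    obtain ⟨kp, vals⟩ := hd
    by_cases hany : (vals.any (fun v => v ≠ vals.headD 0)) = true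
    · simp only [isckCheck, hany, if_true]
    · rw [Bool.not_eq_true] at hany
      simp only [isckCheck, hany, if_false, Bool.false_eq_true]
      apply ih
      obtain ⟨pr, hpr, x, hx, hxr⟩ := h
      rcases List.mem_cons.mp hpr with heq | htl
      · exfalso
        subst heq
        simp only [List.any_eq_false, decide_eq_true_eq, ne_eq, not_not] at hany
        exact hxr (hany x hx)
      · exact ⟨pr, htl, x, hx, hxr⟩

-- pass 1 never repairs an inconsistent group
theorem isck_build_bad (klen : Int) (l : List (Int × Int)) :
    ∀ g : PySem.Dict Int (List Int), g.keys.Nodup → isckBad g →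
    isckBad (isckBuild klen g l) := by
  induction l with
  | nil => intro g _ hb; simpa [isckBuild] using hb
  | cons hd tl ih =>
    intro g hnd hb
    obtain ⟨p, kv⟩ := hd
    obtain ⟨pr, hpr, x, hx, hxr⟩ := hb
    simp only [isckBuild]
    cases hget : g.get? (PySem.Int.mod p klen) with
    | none =>
      apply ih _ (PySem.Dict.nodup_keys_insert g _ _ hnd)
      have hcont : g.contains (PySem.Int.mod p klen) = false := by
        rw [PySem.Dict.contains_eq_isSome_get?, hget]; rfl
      refine ⟨pr, ?_, x, hx, hxr⟩
      rw [PySem.Dict.items_insert_of_not_contains g _ hcont]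
      exact List.mem_append_left _ hpr
    | some vs =>
      apply ih _ (PySem.Dict.nodup_keys_insert g _ _ hnd)
      rw [isckBad]
      rw [PySem.Dict.items_insert_of_contains g (vs ++ [kv])
        (by rw [PySem.Dict.contains_eq_isSome_get?, hget]; rfl)]
      by_cases hk : pr.1 = PySem.Int.mod p klen
      · have hvs : pr.2 = vs := by
          have h1 : (pr.1, pr.2) ∈ g.items := by simpa using hpr
          have h2 := (PySem.Dict.get?_eq_some_iff_mem_items g pr.1 pr.2 hnd).mpr h1
          rw [hk, hget] at h2
          exact (Option.some_injective _ h2).symm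
        refine ⟨(PySem.Int.mod p klen, vs ++ [kv]), ?_, x, ?_, ?_⟩
        · exact List.mem_map.mpr ⟨pr, hpr, by simp [hk]⟩
        · exact List.mem_append_left _ (hvs ▸ hx)
        · have hnev : vs ≠ [] := fun hEq => by rw [hvs, hEq] at hx; simp at hx
          rw [isck_headD_append vs [kv] hnev, ← hvs]
          exact hxr
      · refine ⟨pr, ?_, x, hx, hxr⟩
        exact List.mem_map.mpr ⟨pr, hpr, by simp [fun h => hk (by simpa using h)]⟩

-- main invariant: A's scan from `d` equals B's check of the groups built from `g`
theorem isck_main (klen : Int) (l : List (Int × Int)) :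
    ∀ (d : PySem.Dict Int Int) (g : PySem.Dict Int (List Int)),
    List.Forall₂ isckRel d.items g.items → d.keys.Nodup → g.keys.Nodup →
    isckAGo klen d l = isckCheck PySem.Dict.empty (isckBuild klen g l).items := by
  induction l with
  | nil =>
    intro d g hrel _ hgnd
    have := isck_check_ok d.items g.items hrel PySem.Dict.empty
      (by simpa [PySem.Dict.keys] using hgnd) (by intro k _; rfl)
    simpa [isckAGo, isckBuild, PySem.Dict.empty] using this.symm
  | cons hd tl ih =>
    intro d g hrel hdnd hgnd
    obtain ⟨p, kv⟩ := hd
    have hget := isck_get_rel d.items g.items hrel (PySem.Int.mod p klen)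
    have hde : PySem.Dict.mk d.items = d := rfl
    have hge : PySem.Dict.mk g.items = g := rfl
    rw [hde, hge] at hget
    simp only [isckAGo, isckBuild]
    rcases hget with ⟨hdn, hgn⟩ | ⟨v, vs, hdv, hgv, hvsne, hvsall⟩
    · rw [hdn, hgn]
      have hdcont : d.contains (PySem.Int.mod p klen) = false := by
        rw [PySem.Dict.contains_eq_isSome_get?, hdn]; rfl
      have hgcont : g.contains (PySem.Int.mod p klen) = false := by
        rw [PySem.Dict.contains_eq_isSome_get?, hgn]; rfl
      apply ih
      · rw [PySem.Dict.items_insert_of_not_contains d kv hdcont,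
            PySem.Dict.items_insert_of_not_contains g [kv] hgcont]
        exact List.rel_append hrel
          (List.forall₂_cons.mpr ⟨⟨rfl, by simp, by simp⟩, List.Forall₂.nil⟩)
      · exact PySem.Dict.nodup_keys_insert d _ _ hdnd
      · exact PySem.Dict.nodup_keys_insert g _ _ hgnd
    · rw [hdv, hgv]
      have hgcont : g.contains (PySem.Int.mod p klen) = true := by
        rw [PySem.Dict.contains_eq_isSome_get?, hgv]; rfl
      by_cases hv : v = kv
      · subst hv
        simp only [ne_eq, not_true_eq_false, ite_false]
        apply ih
        · rw [PySem.Dict.items_insert_of_contains g (vs ++ [v]) hgcont]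
          rw [List.forall₂_map_right_iff]
          rw [List.forall₂_iff_zip] at hrel ⊢
          refine ⟨by simpa using hrel.1, ?_⟩
          intro a b hzip
          have hab := hrel.2 hzip
          have hbmem : b ∈ g.items := (List.of_mem_zip hzip).2
          obtain ⟨hk, hne, hall⟩ := hab
          by_cases hbk : b.1 = PySem.Int.mod p klen
          · have hbvs : b.2 = vs := by
              have h1 : (b.1, b.2) ∈ g.items := by simpa using hbmem
              have h2 := (PySem.Dict.get?_eq_some_iff_mem_items g b.1 b.2 hgnd).mpr h1
              rw [hbk, hgv] at h2
              exact (Option.some_injective _ h2).symm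
            have hamem : a ∈ d.items := (List.of_mem_zip hzip).1
            have hav : a.2 = v := by
              have h1 : (a.1, a.2) ∈ d.items := by simpa using hamem
              have h2 := (PySem.Dict.get?_eq_some_iff_mem_items d a.1 a.2 hdnd).mpr h1
              rw [← hk, hbk, hdv] at h2
              exact (Option.some_injective _ h2).symm
            rw [if_pos (by simp [hbk])]
            refine ⟨by rw [← hbk, hk], by simp, ?_⟩
            intro x hxmem
            rcases (List.mem_append.mp hxmem) with hxvs | hxv
            · rw [hav]; exact hvsall x hxvs
            · rw [hav]; simpa using hxv
          · rw [if_neg (by simp [hbk])]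
            exact ⟨hk, hne, hall⟩
        · exact hdnd
        · rw [PySem.Dict.keys_insert_of_contains g _ hgcont]; exact hgnd
      · simp only [ne_eq, hv, not_false_eq_true, ite_true]
        have hbad : isckBad (g.insert (PySem.Int.mod p klen) (vs ++ [kv])) := by
          refine ⟨(PySem.Int.mod p klen, vs ++ [kv]),
            PySem.Dict.mem_items_insert_self g _ _, kv, by simp, ?_⟩
          have hhead : (vs ++ [kv]).headD 0 = v := by
            rw [isck_headD_append vs [kv] hvsne]
            cases vs with
            | nil => exact absurd rfl hvsne
            | cons w t => simpa using hvsall w (by simp)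
          rw [hhead]
          exact fun h => hv h.symm
        exact (isck_check_bad _ PySem.Dict.empty (isck_build_bad klen tl _
          (PySem.Dict.nodup_keys_insert g _ _ hgnd) hbad)).symm

-- ===== VERDICT (by name: the statement is the Claim_ definition above) =====
theorem is_consistent_key_spec : Claim_equal_is_consistent_key := by
  intro key_vals klen _ _
  unfold Spec_is_consistent_key is_consistent_key is_consistent_key_alt
  exact isck_main klen key_vals PySem.Dict.empty PySem.Dict.empty
    List.Forall₂.nil (by simp) (by simp)
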